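-- pv_equiv track=rewrite | github.com/zehanort/RFdiffusion2 | rf_diffusion/benchmark/per_sequence_metrics.py | has_valid_ccd
-- ===== SOURCE A (Python) =====
-- def has_valid_ccd(row):
--     '''
--     This stores the labels of M-CSA entries with valid CCD codes (i.e. CCD codes correctly recognized by chai)
--     '''
--     if 'M0' not in row['name']:
--         return True
--     good_labels = 'M0040_13pk,M0050_1dbt,M0078_1al6,M0092_1dli,M0093_1dqa,M0096_1chm,M0097_1ctt,M0129_1os7,M0151_1q0n,M0157_1qh5,M0179_1q3s,M0188_1xel,M0315_1ey3,M0349_1e3v,M0365_1pfk,M0375_4ts9,M0500_1e3i,M0552_1fgh,M0555_1f8r,M0584_1ldm,M0636_1uaq,M0663_1rk2,M0664_2dhn,M0710_1ra0,M0711_2esd,M0732_1xs1,M0738_1o98,M0739_1knp,M0904_1qgx,M0907_1rbl'.split(',')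
--     for label in good_labels:
--         if label in row['name']:
--             return True
--     return False
-- ===== SOURCE B (Python) =====
-- _GOOD_LABELS = frozenset(
--     'M0040_13pk,M0050_1dbt,M0078_1al6,M0092_1dli,M0093_1dqa,M0096_1chm,M0097_1ctt,M0129_1os7,M0151_1q0n,M0157_1qh5,M0179_1q3s,M0188_1xel,M0315_1ey3,M0349_1e3v,M0365_1pfk,M0375_4ts9,M0500_1e3i,M0552_1fgh,M0555_1f8r,M0584_1ldm,M0636_1uaq,M0663_1rk2,M0664_2dhn,M0710_1ra0,M0711_2esd,M0732_1xs1,M0738_1o98,M0739_1knp,M0904_1qgx,M0907_1rbl'.split(',')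
-- )
--
-- def has_valid_ccd(row):
--     # Single left-to-right sliding pass: every good label is 10 chars and starts
--     # with 'M0', so it suffices to test the 10-char window at each 'M0' site
--     # against a precomputed set.
--     name = row['name']
--     saw_m0 = False
--     for i in range(len(name) - 1):
--         if name[i] == 'M' and name[i + 1] == '0':
--             saw_m0 = True
--             if name[i:i + 10] in _GOOD_LABELS:
--                 return True
--     return not saw_m0
-- ===== Notes on version B (the rewrite author's own statement) =====
-- stated objective: alternative
-- what changed: B makes one left-to-right sliding pass over the name, testing the 10-char window at each 'M0' site against a precomputed frozenset, instead of A's loop of 30 separate substring scans.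
import Mathlib
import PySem

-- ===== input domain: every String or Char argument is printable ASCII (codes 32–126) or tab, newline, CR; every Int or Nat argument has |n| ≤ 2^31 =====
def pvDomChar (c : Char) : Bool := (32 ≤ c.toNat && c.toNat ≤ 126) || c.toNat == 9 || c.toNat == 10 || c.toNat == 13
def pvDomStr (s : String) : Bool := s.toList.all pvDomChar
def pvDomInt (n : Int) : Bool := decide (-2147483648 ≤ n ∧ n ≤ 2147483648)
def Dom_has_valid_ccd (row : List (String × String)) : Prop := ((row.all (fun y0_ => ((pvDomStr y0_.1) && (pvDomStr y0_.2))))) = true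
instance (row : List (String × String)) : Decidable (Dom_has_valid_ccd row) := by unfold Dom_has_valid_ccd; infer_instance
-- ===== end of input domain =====

-- B replaces A's 30 separate substring scans by one left-to-right sliding pass that tests the
-- 10-char window at each 'M0' site against a precomputed set (objective: alternative; same result).

-- ===== PORT A =====
def goodLabelsStr : String := "M0040_13pk,M0050_1dbt,M0078_1al6,M0092_1dli,M0093_1dqa,M0096_1chm,M0097_1ctt,M0129_1os7,M0151_1q0n,M0157_1qh5,M0179_1q3s,M0188_1xel,M0315_1ey3,M0349_1e3v,M0365_1pfk,M0375_4ts9,M0500_1e3i,M0552_1fgh,M0555_1f8r,M0584_1ldm,M0636_1uaq,M0663_1rk2,M0664_2dhn,M0710_1ra0,M0711_2esd,M0732_1xs1,M0738_1o98,M0739_1knp,M0904_1qgx,M0907_1rbl"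

def has_valid_ccd (row : List (String × String)) : Bool :=
  match (PySem.Dict.mk row).get? "name" with
  | none => false   -- Python raises KeyError here; excluded by Pre_
  | some name =>
    if !(PySem.Str.isIn "M0" name) then true
    else
      let good_labels := (PySem.Str.split? goodLabelsStr ",").getD []
      good_labels.any (fun label => PySem.Str.isIn label name)

-- ===== PORT B =====
-- the frozenset of good labels, as distinct char lists (strings handled on the List Char side)
def goodSet : PySem.Set (List Char) := PySem.Set.ofList
  ["M0040_13pk".toList, "M0050_1dbt".toList, "M0078_1al6".toList, "M0092_1dli".toList,
   "M0093_1dqa".toList, "M0096_1chm".toList, "M0097_1ctt".toList, "M0129_1os7".toList,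
   "M0151_1q0n".toList, "M0157_1qh5".toList, "M0179_1q3s".toList, "M0188_1xel".toList,
   "M0315_1ey3".toList, "M0349_1e3v".toList, "M0365_1pfk".toList, "M0375_4ts9".toList,
   "M0500_1e3i".toList, "M0552_1fgh".toList, "M0555_1f8r".toList, "M0584_1ldm".toList,
   "M0636_1uaq".toList, "M0663_1rk2".toList, "M0664_2dhn".toList, "M0710_1ra0".toList,
   "M0711_2esd".toList, "M0732_1xs1".toList, "M0738_1o98".toList, "M0739_1knp".toList,
   "M0904_1qgx".toList, "M0907_1rbl".toList]

-- the sliding pass of Source B: advance one char at a time, at each 'M0' site test the 10-char window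
def altAux : List Char → Bool → Bool
  | c1 :: c2 :: rest, saw =>
      if c1 = 'M' ∧ c2 = '0' then
        if PySem.Set.contains goodSet ((c1 :: c2 :: rest).take 10) then true
        else altAux (c2 :: rest) true
      else altAux (c2 :: rest) saw
  | _, saw => !saw

def has_valid_ccd_alt (row : List (String × String)) : Bool :=
  match (PySem.Dict.mk row).get? "name" with
  | none => false   -- Python raises KeyError here; excluded by Pre_
  | some name => altAux name.toList false

-- ===== PRECONDITION & SPEC =====
-- Pre_ excludes exactly the rows without a 'name' key, on which both A and B raise KeyError.
def Pre_has_valid_ccd (row : List (String × String)) : Prop :=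
  (PySem.Dict.mk row).contains "name" = true
instance (row : List (String × String)) : Decidable (Pre_has_valid_ccd row) := by
  unfold Pre_has_valid_ccd; infer_instance

def pvWitness_has_valid_ccd : (List (String × String)) := [("name", "M0040_13pk foo")]

def Spec_has_valid_ccd (row : List (String × String)) (out : Bool) : Prop := out = has_valid_ccd_alt row
instance (row : List (String × String)) (out : Bool) : Decidable (Spec_has_valid_ccd row out) := by unfold Spec_has_valid_ccd; infer_instance

-- ===== CLAIM (what is proved, stated in full; the proofs are below) =====
def Claim_equal_has_valid_ccd : Prop := ∀ (row : List (String × String)), Dom_has_valid_ccd row → Pre_has_valid_ccd row → Spec_has_valid_ccd row (has_valid_ccd row)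

-- ===== LEMMAS AND PROOFS =====

-- A's split of the literal label string, evaluated
theorem goodLabels_eval : (PySem.Str.split? goodLabelsStr ",").getD [] =
    ["M0040_13pk", "M0050_1dbt", "M0078_1al6", "M0092_1dli", "M0093_1dqa", "M0096_1chm",
     "M0097_1ctt", "M0129_1os7", "M0151_1q0n", "M0157_1qh5", "M0179_1q3s", "M0188_1xel",
     "M0315_1ey3", "M0349_1e3v", "M0365_1pfk", "M0375_4ts9", "M0500_1e3i", "M0552_1fgh",
     "M0555_1f8r", "M0584_1ldm", "M0636_1uaq", "M0663_1rk2", "M0664_2dhn", "M0710_1ra0",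
     "M0711_2esd", "M0732_1xs1", "M0738_1o98", "M0739_1knp", "M0904_1qgx", "M0907_1rbl"] := by
  set_option maxRecDepth 100000 in decide

-- B's set is exactly A's label list, read as char lists
theorem goodSet_eq_map :
    goodSet = ((PySem.Str.split? goodLabelsStr ",").getD []).map String.toList := by
  set_option maxRecDepth 100000 in decide

-- every member of the set is 10 chars long and starts with 'M', '0'
theorem goodSet_shape : ∀ l, PySem.Set.contains goodSet l = true →
    l.length = 10 ∧ l.take 2 = ['M', '0'] := by
  intro l h
  rw [PySem.Set.contains_iff, goodSet_eq_map, goodLabels_eval, List.mem_map] at h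
  obtain ⟨label, hm, rfl⟩ := h
  fin_cases hm <;> exact ⟨by decide, by decide⟩

-- membership in B's set ↔ membership in A's label list (as char lists)
theorem goodSet_mem_iff : ∀ l, PySem.Set.contains goodSet l = true ↔
    ∃ label ∈ (PySem.Str.split? goodLabelsStr ",").getD [], label.toList = l := by
  intro l
  rw [PySem.Set.contains_iff, goodSet_eq_map, List.mem_map]

-- Boolean "some 'M0' occurrence" mirror of the pass
def m0B : List Char → Bool
  | c1 :: c2 :: rest => (decide (c1 = 'M' ∧ c2 = '0')) || m0B (c2 :: rest)
  | _ => false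

-- Boolean "some 10-char window is a good label", checked at every position
def hitsB : List Char → Bool
  | [] => false
  | c :: rest => PySem.Set.contains goodSet ((c :: rest).take 10) || hitsB rest

theorem m0B_iff_infix : ∀ cs : List Char, m0B cs = true ↔ ['M', '0'] <:+: cs := by
  intro cs
  induction cs with
  | nil => simp [m0B]
  | cons c1 t ih =>
    cases t with
    | nil =>
      simp only [m0B, Bool.false_eq_true, false_iff]
      intro h
      have := h.length_le; simp at this
    | cons c2 rest =>
      simp only [m0B, Bool.or_eq_true, decide_eq_true_eq, ih, List.infix_cons_iff]
      constructor
      · rintro (⟨rfl, rfl⟩ | h)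
        · exact Or.inl ⟨rest, rfl⟩
        · exact Or.inr h
      · rintro (⟨t, ht⟩ | h)
        · cases ht; exact Or.inl ⟨rfl, rfl⟩
        · exact Or.inr h

theorem hitsB_iff : ∀ cs : List Char, hitsB cs = true ↔
    ∃ k, PySem.Set.contains goodSet ((cs.drop k).take 10) = true := by
  intro cs
  induction cs with
  | nil =>
    simp only [hitsB, List.drop_nil, List.take_nil, Bool.false_eq_true, false_iff]
    intro ⟨k, hk⟩
    have := (goodSet_shape _ hk).1; simp at this
  | cons c rest ih =>
    simp only [hitsB, Bool.or_eq_true, ih]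
    constructor
    · rintro (h | ⟨k, hk⟩)
      · exact ⟨0, h⟩
      · exact ⟨k + 1, hk⟩
    · rintro ⟨k, hk⟩
      cases k with
      | zero => exact Or.inl hk
      | succ k => exact Or.inr ⟨k, hk⟩

-- windows-hit ↔ some good label is an infix
theorem hitsB_iff_label_infix : ∀ cs : List Char, hitsB cs = true ↔
    ∃ label ∈ (PySem.Str.split? goodLabelsStr ",").getD [], label.toList <:+: cs := by
  intro cs
  rw [hitsB_iff]
  constructor
  · rintro ⟨k, hk⟩
    obtain ⟨hlen, -⟩ := goodSet_shape _ hk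
    obtain ⟨label, hm, hl⟩ := (goodSet_mem_iff _).1 hk
    refine ⟨label, hm, ?_⟩
    have hpre : label.toList <+: cs.drop k := by
      rw [List.prefix_iff_eq_take, hl, hlen]
    exact hpre.isInfix.trans (List.drop_suffix k cs).isInfix
  · rintro ⟨label, hm, hinf⟩
    have hset : PySem.Set.contains goodSet label.toList = true :=
      (goodSet_mem_iff _).2 ⟨label, hm, rfl⟩
    obtain ⟨hlen, -⟩ := goodSet_shape _ hset
    obtain ⟨t, hpre, hsuf⟩ := List.infix_iff_prefix_suffix.1 hinf
    have heq := List.suffix_iff_eq_drop.1 hsuf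
    refine ⟨cs.length - t.length, ?_⟩
    have hw : (cs.drop (cs.length - t.length)).take 10 = label.toList := by
      rw [← heq, ← hlen, ← List.prefix_iff_eq_take.1 hpre]
    rw [hw]; exact hset

-- the sliding pass, characterised
theorem altAux_eq : ∀ (cs : List Char) (saw : Bool),
    altAux cs saw = (hitsB cs || (!saw && !m0B cs)) := by
  intro cs
  induction cs with
  | nil => intro saw; simp [altAux, hitsB, m0B]
  | cons c1 t ih =>
    intro saw
    cases t with
    | nil =>
      have hno : PySem.Set.contains goodSet ([c1].take 10) = false := by
        cases h : PySem.Set.contains goodSet ([c1].take 10)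
        · rfl
        · have := (goodSet_shape _ h).1; simp at this
      have hno' : [c1].take 10 ∉ goodSet := by
        intro hmem
        rw [← PySem.Set.contains_iff] at hmem
        rw [hmem] at hno; exact absurd hno (by simp)
      simp only [List.take_succ_cons, List.take_nil] at hno'
      simp [altAux, hitsB, m0B, hno']
    | cons c2 rest =>
      by_cases h12 : c1 = 'M' ∧ c2 = '0'
      · have : altAux (c1 :: c2 :: rest) saw =
            (if PySem.Set.contains goodSet ((c1 :: c2 :: rest).take 10) then true
             else altAux (c2 :: rest) true) := by
          simp [altAux, h12]
        rw [this, ih]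
        have hm0 : m0B (c1 :: c2 :: rest) = true := by
          simp [m0B, h12]
        simp only [hitsB, hm0]
        cases PySem.Set.contains goodSet ((c1 :: c2 :: rest).take 10) <;> simp
      · have hno : PySem.Set.contains goodSet ((c1 :: c2 :: rest).take 10) = false := by
          cases h : PySem.Set.contains goodSet ((c1 :: c2 :: rest).take 10)
          · rfl
          · obtain ⟨-, ht2⟩ := goodSet_shape _ h
            simp at ht2
            exact absurd ⟨ht2.1, ht2.2⟩ h12
        have : altAux (c1 :: c2 :: rest) saw = altAux (c2 :: rest) saw := by
          simp [altAux, h12]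
        rw [this, ih]
        have hm0 : m0B (c1 :: c2 :: rest) = m0B (c2 :: rest) := by
          simp [m0B, h12]
        simp only [hitsB, hm0, hno, Bool.false_or]

-- if some good label occurs in cs, then 'M0' occurs in cs
theorem hitsB_imp_m0B : ∀ cs : List Char, hitsB cs = true → m0B cs = true := by
  intro cs h
  obtain ⟨label, hm, hinf⟩ := (hitsB_iff_label_infix cs).1 h
  have hset : PySem.Set.contains goodSet label.toList = true :=
    (goodSet_mem_iff _).2 ⟨label, hm, rfl⟩
  obtain ⟨-, ht2⟩ := goodSet_shape _ hset
  rw [m0B_iff_infix]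
  have : ['M', '0'] <+: label.toList := by
    rw [← ht2]; exact List.take_prefix 2 label.toList
  exact this.isInfix.trans hinf

-- A's label loop ↔ hitsB, at the char level
theorem any_iff_hitsB (cs : List Char) :
    (((PySem.Str.split? goodLabelsStr ",").getD []).any
        (fun label => PySem.Chars.isIn label.toList cs)) = hitsB cs := by
  rcases h : hitsB cs with _ | _
  · rw [List.any_eq_false]
    intro label hm
    simp only [Bool.not_eq_true]
    cases hl : PySem.Chars.isIn label.toList cs
    · rfl
    · exfalso
      rw [PySem.Chars.isIn_iff_infix] at hl
      have : hitsB cs = true := (hitsB_iff_label_infix _).2 ⟨label, hm, hl⟩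
      rw [h] at this; exact absurd this (by simp)
  · rw [List.any_eq_true]
    obtain ⟨label, hm, hinf⟩ := (hitsB_iff_label_infix _).1 h
    exact ⟨label, hm, by rw [PySem.Chars.isIn_iff_infix]; exact hinf⟩

-- ===== VERDICT (by name: the statement is the Claim_ definition above) =====
theorem has_valid_ccd_spec : Claim_equal_has_valid_ccd := by
  intro row _ hpre
  unfold Spec_has_valid_ccd has_valid_ccd has_valid_ccd_alt
  cases hget : (PySem.Dict.mk row).get? "name" with
  | none =>
    rw [Pre_has_valid_ccd, PySem.Dict.contains_eq_isSome_get?, hget] at hpre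
  | some name =>
    simp only [altAux_eq, Bool.not_false, Bool.true_and]
    cases hm : PySem.Str.isIn "M0" name with
    | false =>
      have hm0 : m0B name.toList = false := by
        cases h : m0B name.toList
        · rfl
        · rw [m0B_iff_infix] at h
          rw [PySem.Str.isIn_eq] at hm
          rw [PySem.Chars.isIn_eq_false_iff] at hm
          exact absurd h hm
      have hh : hitsB name.toList = false := by
        cases h : hitsB name.toList
        · rfl
        · rw [hitsB_imp_m0B _ h] at hm0; exact absurd hm0 (by simp)
      simp [hh, hm0]
    | true =>
      have hm0 : m0B name.toList = true := by
        rw [m0B_iff_infix]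
        rw [PySem.Str.isIn_eq, PySem.Chars.isIn_iff_infix] at hm
        exact hm
      simp [any_iff_hitsB, hm0]
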